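-- pv_equiv track=rewrite | github.com/wan-catherine/Leetcode | problems/N1595_Minimum_Cost_To_Connect_Two_Groups_Of_Points.py | connectTwoGroups_tle
-- ===== SOURCE A (Python) =====
-- from math import inf
--
-- def connectTwoGroups_tle(cost):
--     """
--     :type cost: List[List[int]]
--     :rtype: int
--     """
--     l, r = len(cost), len(cost[0])
--     dp = [[float(inf)] * 2**r for _ in range(l)]
--     for i in range(1, 2**r):
--         val = 0
--         for j in range(r):
--             if (i >> j) & 1:
--                 val += cost[0][j]
--         dp[0][i] = val
--     minimum = [min(cost[i]) for i in range(l)]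
--     for i in range(1, l):
--         for j in range(1, 2**r):
--             subset = j
--             while subset > 0:
--                 val = 0
--                 for k in range(r):
--                     if (subset >> k) & 1:
--                         val += cost[i][k]
--                 dp[i][j] = min(dp[i][j], dp[i-1][j-subset]+val)
--                 subset = (subset - 1)&j
--             dp[i][j] = min(dp[i][j], dp[i-1][j] + minimum[i])
--     return dp[-1][-1]
-- ===== SOURCE B (Python) =====
-- def connectTwoGroups_tle(cost):
--     # Bitmask DP with one-right-point-per-transition: for each left row, best[mask]
--     # is built over masks in increasing order by clearing one set bit at a time
--     # (O(l * 2^r * r)) instead of enumerating every submask of every mask (O(l * 3^r * r)).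
--     l, r = len(cost), len(cost[0])
--     full = 1 << r
--     INF = float('inf')
--     prev = [INF] * full
--     for mask in range(1, full):
--         prev[mask] = sum(cost[0][k] for k in range(r) if (mask >> k) & 1)
--     for row in cost[1:]:
--         m = min(row)
--         t = [INF] * full
--         for mask in range(1, full):
--             best = INF
--             for k in range(r):
--                 if (mask >> k) & 1:
--                     pm = mask - (1 << k)
--                     cand = min(prev[pm], t[pm]) + row[k]
--                     if cand < best:
--                         best = cand
--             t[mask] = best
--         prev = [INF] + [min(t[mask], prev[mask] + m) for mask in range(1, full)]
--     return prev[-1]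
-- ===== Notes on version B (the rewrite author's own statement) =====
-- stated objective: faster
-- what changed: B replaces A's submask-enumeration DP (for every mask, walk all of its submasks via subset=(subset-1)&j, O(l*3^r*r)) with a one-right-point-per-transition bitmask DP: per left row a table t[mask] is built over masks in increasing order, each mask reached by clearing one set bit from already-computed entries (O(l*2^r*r)), keeping only a rolling previous row; intended as faster (drops 3^r to 2^r) and measured 11.4x at n=64, though both remain exponential in r and time out at n=256.
import Mathlib
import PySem

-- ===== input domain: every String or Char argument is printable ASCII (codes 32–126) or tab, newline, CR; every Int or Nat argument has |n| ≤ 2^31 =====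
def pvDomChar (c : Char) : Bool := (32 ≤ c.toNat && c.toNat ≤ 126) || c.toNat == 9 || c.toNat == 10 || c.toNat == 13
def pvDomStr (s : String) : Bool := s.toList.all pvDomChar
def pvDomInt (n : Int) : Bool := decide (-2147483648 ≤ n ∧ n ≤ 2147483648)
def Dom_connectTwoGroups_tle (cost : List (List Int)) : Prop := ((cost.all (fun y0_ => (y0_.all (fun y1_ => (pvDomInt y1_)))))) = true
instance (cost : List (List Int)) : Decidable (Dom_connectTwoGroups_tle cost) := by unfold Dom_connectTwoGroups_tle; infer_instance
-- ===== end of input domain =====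

-- B replaces A's submask-enumeration DP (every submask of every mask) by a
-- one-right-point-per-transition bitmask DP (clear one set bit at a time); intended as
-- faster (measured 11.4x at n=64; both are exponential in r and time out at the largest size).

-- ===== PORT A =====
-- float('inf') cells are modelled as `none : Option Int`; Python's min/+ on them is pyMinO/addO.
def pyMinO : Option Int → Option Int → Option Int
  | none, b => b
  | some a, none => some a
  | some a, some b => some (min a b)

def addO (o : Option Int) (v : Int) : Option Int := o.map (· + v)

-- `val` loop: for k in range(r): if (m >> k) & 1: val += cost_row[k]
-- row.getD k 0 never hits its default on inputs admitted by Pre_ (rows have length ≥ r).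
def bitVal (row : List Int) (r m : Nat) : Int :=
  (List.range r).foldl (fun v k => if (m >>> k) &&& 1 = 1 then v + row.getD k 0 else v) 0

-- while subset > 0: dp[i][j] = min(dp[i][j], dp[i-1][j-subset]+val); subset = (subset-1)&j
def subLoopA (prev : List (Option Int)) (row : List Int) (r j : Nat) (subset : Nat)
    (acc : Option Int) : Option Int :=
  if subset = 0 then acc
  else
    subLoopA prev row r j ((subset - 1) &&& j)
      (pyMinO acc (addO (prev.getD (j - subset) none) (bitVal row r subset)))
termination_by subset
decreasing_by
  rename_i h
  have := Nat.and_le_left (n := subset - 1) (m := j)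
  omega

-- body of `for j in range(1, 2**r)` producing dp row i from dp row i-1
def rowStepA (r : Nat) (prev : List (Option Int)) (row : List Int) (mi : Int) :
    List (Option Int) :=
  (List.range (2 ^ r)).map (fun j =>
    if j = 0 then none
    else pyMinO (subLoopA prev row r j j none) (addO (prev.getD j none) mi))

-- dp[0] after the `for i in range(1, 2**r)` fill
def dp0A (row0 : List Int) (r : Nat) : List (Option Int) :=
  (List.range (2 ^ r)).map (fun i => if i = 0 then none else some (bitVal row0 r i))

def connectTwoGroups_tle (cost : List (List Int)) : Int :=
  let r := (cost.headD []).length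
  -- minimum = [min(cost[i]) for i in range(l)]; getD 0 unreachable under Pre_ (rows nonempty)
  let minimum := cost.map (fun row => (PySem.List.min? row (fun y => y)).getD 0)
  let table := (List.zip (cost.drop 1) (minimum.drop 1)).foldl
      (fun tab rm => tab ++ [rowStepA r (tab.getLastD []) rm.1 rm.2])
      [dp0A (cost.headD []) r]
  -- return dp[-1][-1]; `none` (float inf) unreachable under Pre_ (Python returns no int there)
  match (table.getLastD []).getD (2 ^ r - 1) none with
  | some v => v
  | none => 0

-- ===== PORT B =====
def optLtB : Option Int → Option Int → Bool
  | none, _ => false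
  | some _, none => true
  | some a, some b => a < b

-- prev[mask] = sum(cost[0][k] for k in range(r) if (mask >> k) & 1)
def sumBitsB (row : List Int) (r mask : Nat) : Int :=
  ((List.range r).filter (fun k => (mask >>> k) &&& 1 == 1)).foldl
    (fun s k => s + row.getD k 0) 0

-- inner `for k in range(r)` loop of B: best over single-bit transitions into mask
def innerB (prev t : List (Option Int)) (row : List Int) (r mask : Nat) : Option Int :=
  (List.range r).foldl (fun best k =>
    if (mask >>> k) &&& 1 = 1 then
      let cand := addO (pyMinO (prev.getD (mask - 2 ^ k) none) (t.getD (mask - 2 ^ k) none))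
        (row.getD k 0)
      if optLtB cand best then cand else best
    else best) none

-- the t array after the `for mask in range(1, full)` loop has written entries < n
def buildT (prev : List (Option Int)) (row : List Int) (r : Nat) : Nat → List (Option Int)
  | 0 => []
  | n + 1 =>
      buildT prev row r n ++
        [if n = 0 then none else innerB prev (buildT prev row r n) row r n]

-- prev = [INF] + [min(t[mask], prev[mask] + m) for mask in range(1, full)]
def rowStepB (r : Nat) (prev : List (Option Int)) (row : List Int) : List (Option Int) :=
  let t := buildT prev row r (2 ^ r)
  let m := (PySem.List.min? row (fun y => y)).getD 0
  (List.range (2 ^ r)).map (fun mask =>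
    if mask = 0 then none else pyMinO (t.getD mask none) (addO (prev.getD mask none) m))

def connectTwoGroups_tle_alt (cost : List (List Int)) : Int :=
  let r := (cost.headD []).length
  let prev0 : List (Option Int) := (List.range (2 ^ r)).map (fun mask =>
    if mask = 0 then none else some (sumBitsB (cost.headD []) r mask))
  match ((cost.drop 1).foldl (fun prev row => rowStepB r prev row) prev0).getD (2 ^ r - 1) none
      with
  | some v => v
  | none => 0

-- ===== PRECONDITION & SPEC =====
-- Pre_ is exactly where the Python A returns an int: cost[0] nonempty (else ValueError, or a
-- float inf result when l = 1) and no later row shorter than cost[0] (else IndexError or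
-- ValueError is raised before the return).
def Pre_connectTwoGroups_tle (cost : List (List Int)) : Prop :=
  0 < (cost.headD []).length ∧ ∀ row ∈ cost, (cost.headD []).length ≤ row.length
instance (cost : List (List Int)) : Decidable (Pre_connectTwoGroups_tle cost) := by
  unfold Pre_connectTwoGroups_tle; infer_instance

def pvWitness_connectTwoGroups_tle : List (List Int) := [[1, 3, 5], [4, 1, 1], [1, 5, 3]]

def Spec_connectTwoGroups_tle (cost : List (List Int)) (out : Int) : Prop :=
  out = connectTwoGroups_tle_alt cost
instance (cost : List (List Int)) (out : Int) : Decidable (Spec_connectTwoGroups_tle cost out) := by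
  unfold Spec_connectTwoGroups_tle; infer_instance

-- ===== CLAIM (what is proved, stated in full; the proofs are below) =====
def Claim_equal_connectTwoGroups_tle : Prop :=
  ∀ (cost : List (List Int)), Dom_connectTwoGroups_tle cost →
    Pre_connectTwoGroups_tle cost → Spec_connectTwoGroups_tle cost (connectTwoGroups_tle cost)

-- ===== LEMMAS AND PROOFS =====

-- ---- generic bit-level facts ----

theorem bit_iff (m k : Nat) : ((m >>> k) &&& 1 = 1) ↔ m.testBit k = true := by
  rw [Nat.testBit, Nat.one_and_eq_mod_two, Nat.and_one_is_mod]
  rcases Nat.mod_two_eq_zero_or_one (m >>> k) with h | h <;> simp [h]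

theorem and_div_two (a b : Nat) : (a &&& b) / 2 = a / 2 &&& b / 2 :=
  Nat.eq_of_testBit_eq fun i => by
    simp [Nat.testBit_div_two, Nat.testBit_and]

theorem and_mod_two (a b : Nat) : (a &&& b) % 2 = min (a % 2) (b % 2) := by
  have h := Nat.testBit_and a b 0
  simp only [Nat.testBit_zero, decide_eq_true_eq] at h
  rcases Nat.mod_two_eq_zero_or_one a with ha | ha <;>
    rcases Nat.mod_two_eq_zero_or_one b with hb | hb <;>
    rcases Nat.mod_two_eq_zero_or_one (a &&& b) with hab | hab <;>
    simp [ha, hb, hab] at h ⊢ <;> omega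

theorem two_pow_le_of_testBit (s k : Nat) (h : s.testBit k = true) : 2 ^ k ≤ s := by
  by_contra hc
  rw [Nat.testBit_lt_two_pow (by omega)] at h
  exact Bool.false_ne_true h

theorem testBit_sub_pow (k : Nat) : ∀ s, s.testBit k = true →
    ∀ i, (s - 2 ^ k).testBit i = if i = k then false else s.testBit i := by
  induction k with
  | zero =>
      intro s hs i
      have hs1 : s % 2 = 1 := by
        simpa [Nat.testBit_zero, decide_eq_true_eq] using hs
      match i with
      | 0 => simp [Nat.testBit_zero]; omega
      | i + 1 =>
          rw [← Nat.testBit_div_two, ← Nat.testBit_div_two]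
          have h2 : (s - 1) / 2 = s / 2 := by omega
          simp [h2]
  | succ k ih =>
      intro s hs i
      have hsd : (s / 2).testBit k = true := by rw [Nat.testBit_div_two]; exact hs
      have hle : 2 ^ (k + 1) ≤ s := two_pow_le_of_testBit s (k + 1) hs
      have hpow : 2 ^ (k + 1) = 2 * 2 ^ k := by ring
      have hdiv : (s - 2 ^ (k + 1)) / 2 = s / 2 - 2 ^ k := by omega
      have hmod : (s - 2 ^ (k + 1)) % 2 = s % 2 := by omega
      match i with
      | 0 => simp [Nat.testBit_zero, hmod]
      | i + 1 =>
          rw [← Nat.testBit_div_two, ← Nat.testBit_div_two, hdiv, ih (s / 2) hsd i]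
          by_cases h : i = k <;> simp [h]

theorem testBit_add_pow (k : Nat) : ∀ s, s.testBit k = false →
    ∀ i, (s + 2 ^ k).testBit i = if i = k then true else s.testBit i := by
  induction k with
  | zero =>
      intro s hs i
      have hs1 : s % 2 = 0 := by
        have := Nat.testBit_zero s
        rcases Nat.mod_two_eq_zero_or_one s with h | h
        · exact h
        · simp [Nat.testBit_zero, h] at hs
      match i with
      | 0 => simp [Nat.testBit_zero]; omega
      | i + 1 =>
          rw [← Nat.testBit_div_two, ← Nat.testBit_div_two]
          have h2 : (s + 1) / 2 = s / 2 := by omega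
          simp [h2]
  | succ k ih =>
      intro s hs i
      have hsd : (s / 2).testBit k = false := by rw [Nat.testBit_div_two]; exact hs
      have hpow : 2 ^ (k + 1) = 2 * 2 ^ k := by ring
      have hdiv : (s + 2 ^ (k + 1)) / 2 = s / 2 + 2 ^ k := by omega
      have hmod : (s + 2 ^ (k + 1)) % 2 = s % 2 := by omega
      match i with
      | 0 => simp [Nat.testBit_zero, hmod]
      | i + 1 =>
          rw [← Nat.testBit_div_two, ← Nat.testBit_div_two, hdiv, ih (s / 2) hsd i]
          by_cases h : i = k <;> simp [h]

theorem submask_iff (s j : Nat) :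
    s &&& j = s ↔ ∀ i, s.testBit i = true → j.testBit i = true := by
  constructor
  · intro h i hi
    have := congrArg (fun x => x.testBit i) h
    simp only [Nat.testBit_and, hi, Bool.true_and] at this
    exact this
  · intro h
    apply Nat.eq_of_testBit_eq
    intro i
    rw [Nat.testBit_and]
    cases hsi : s.testBit i
    · simp
    · simp [h i hsi]

theorem exists_testBit (s : Nat) (hs : s ≠ 0) : ∃ k, s.testBit k = true := by
  by_contra hc
  push_neg at hc
  exact hs (Nat.eq_of_testBit_eq fun i => by
    simp [Bool.eq_false_iff.mpr (hc i)])

-- the crux of A's submask enumeration: no submask of j lies strictly between (s-1)&&&j and s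
theorem submask_le_pred_and :
    ∀ j s s', s &&& j = s → s' &&& j = s' → s' < s → s' ≤ (s - 1) &&& j := by
  intro j
  induction j using Nat.strong_induction_on with
  | _ j ih =>
    intro s s' hs hs' hlt
    by_cases hj : j = 0
    · subst hj; simp [Nat.and_zero] at hs; omega
    have hj2 : j / 2 < j := Nat.div_lt_self (by omega) (by omega)
    have hsd : s / 2 &&& j / 2 = s / 2 := by rw [← and_div_two, hs]
    have hsd' : s' / 2 &&& j / 2 = s' / 2 := by rw [← and_div_two, hs']
    have hsm : min (s % 2) (j % 2) = s % 2 := by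
      have := and_mod_two s j; rw [hs] at this; omega
    have hsm' : min (s' % 2) (j % 2) = s' % 2 := by
      have := and_mod_two s' j; rw [hs'] at this; omega
    have htd : ((s - 1) &&& j) / 2 = (s - 1) / 2 &&& j / 2 := and_div_two _ _
    have htm : ((s - 1) &&& j) % 2 = min ((s - 1) % 2) (j % 2) := and_mod_two _ _
    rcases Nat.mod_two_eq_zero_or_one s with hse | hso
    · -- s even, s > 0
      have hs2 : 1 ≤ s / 2 := by omega
      have hd1 : (s - 1) / 2 = s / 2 - 1 := by omega
      have hd2 : (s - 1) % 2 = 1 := by omega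
      have hlt2 : s' / 2 < s / 2 := by omega
      have hih := ih (j / 2) hj2 (s / 2) (s' / 2) hsd hsd' hlt2
      rw [hd1] at htd
      have h1 : s' = 2 * (s' / 2) + s' % 2 := by omega
      have h2 : (s - 1) &&& j = 2 * ((s / 2 - 1) &&& j / 2) + min 1 (j % 2) := by
        rw [hd2] at htm; omega
      have h3 : s' % 2 ≤ j % 2 := by omega
      omega
    · -- s odd: (s-1)&&&j = 2*(s/2)
      have hd1 : (s - 1) / 2 = s / 2 := by omega
      have hd2 : (s - 1) % 2 = 0 := by omega
      have h2 : (s - 1) &&& j = 2 * (s / 2 &&& j / 2) := by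
        rw [hd2] at htm; rw [hd1] at htd; omega
      rw [hsd] at h2
      omega

-- ---- Option-Int minimum machinery ----

def oLe : Option Int → Option Int → Prop
  | _, none => True
  | none, some _ => False
  | some a, some b => a ≤ b

def minsF (l : List (Option Int)) : Option Int := l.foldl pyMinO none

theorem pyMinO_none_right (a : Option Int) : pyMinO a none = a := by cases a <;> rfl

theorem pyMinO_assoc (a b c : Option Int) :
    pyMinO (pyMinO a b) c = pyMinO a (pyMinO b c) := by
  cases a <;> cases b <;> cases c <;> simp [pyMinO, min_assoc]

theorem foldl_pyMinO_acc (l : List (Option Int)) : ∀ a, l.foldl pyMinO a = pyMinO a (minsF l) := by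
  induction l with
  | nil => intro a; simp [minsF, List.foldl, pyMinO_none_right]
  | cons x t ih =>
      intro a
      have hm : minsF (x :: t) = pyMinO x (minsF t) := by
        simp only [minsF, List.foldl]
        rw [ih (pyMinO none x)]
        rfl
      simp only [List.foldl]
      rw [ih (pyMinO a x), hm, pyMinO_assoc]

theorem minsF_cons (x : Option Int) (l : List (Option Int)) :
    minsF (x :: l) = pyMinO x (minsF l) := by
  simp only [minsF, List.foldl]
  rw [foldl_pyMinO_acc]
  rfl

theorem oLe_refl (a : Option Int) : oLe a a := by cases a <;> simp [oLe]

theorem oLe_none (a : Option Int) : oLe a none := by cases a <;> simp [oLe]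

theorem oLe_trans (a b c : Option Int) (h1 : oLe a b) (h2 : oLe b c) : oLe a c := by
  cases a <;> cases b <;> cases c <;> simp [oLe] at * <;> omega

theorem oLe_antisymm (a b : Option Int) (h1 : oLe a b) (h2 : oLe b a) : a = b := by
  cases a <;> cases b <;> simp [oLe] at * <;> omega

theorem pyMinO_le_left (a b : Option Int) : oLe (pyMinO a b) a := by
  cases a <;> cases b <;> simp [pyMinO, oLe]

theorem pyMinO_le_right (a b : Option Int) : oLe (pyMinO a b) b := by
  cases a <;> cases b <;> simp [pyMinO, oLe]

theorem oLe_addO (a b : Option Int) (c : Int) (h : oLe a b) :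
    oLe (addO a c) (addO b c) := by
  cases a <;> cases b <;> simp [addO, oLe] at * <;> omega

theorem minsF_le (l : List (Option Int)) (x : Option Int) (hx : x ∈ l) : oLe (minsF l) x := by
  induction l with
  | nil => cases hx
  | cons h t ih =>
      rw [minsF_cons]
      rcases List.mem_cons.mp hx with rfl | hx'
      · exact pyMinO_le_left _ _
      · exact oLe_trans _ _ _ (pyMinO_le_right _ _) (ih hx')

theorem minsF_mem (l : List (Option Int)) : minsF l = none ∨ minsF l ∈ l := by
  induction l with
  | nil => left; rfl
  | cons h t ih =>
      rw [minsF_cons]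
      rcases ih with hn | hm
      · rw [hn, pyMinO_none_right]; right; exact List.mem_cons_self ..
      · cases h with
        | none => right; exact List.mem_cons_of_mem _ hm
        | some a =>
            cases hmt : minsF t with
            | none => right; rw [pyMinO_none_right]; exact List.mem_cons_self ..
            | some b =>
                rw [hmt] at hm
                right
                rcases min_choice a b with hc | hc <;>
                  simp only [pyMinO, hc]
                · exact List.mem_cons_self ..
                · exact List.mem_cons_of_mem _ hm

theorem minsF_eq_of_dominate (l₁ l₂ : List (Option Int))
    (h₁ : ∀ x ∈ l₁, ∃ y ∈ l₂, oLe y x) (h₂ : ∀ y ∈ l₂, ∃ x ∈ l₁, oLe x y) :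
    minsF l₁ = minsF l₂ := by
  have key : ∀ (a b : List (Option Int)), (∀ x ∈ a, ∃ y ∈ b, oLe y x) →
      oLe (minsF b) (minsF a) := by
    intro a b hab
    rcases minsF_mem a with hn | hm
    · rw [hn]; exact oLe_none _
    · obtain ⟨y, hy, hley⟩ := hab _ hm
      exact oLe_trans _ _ _ (minsF_le b y hy) hley
  exact oLe_antisymm _ _ (key l₂ l₁ h₂) (key l₁ l₂ h₁)

-- ---- bitVal facts ----

theorem bitVal_succ (row : List Int) (r m : Nat) :
    bitVal row (r + 1) m =
      if (m >>> r) &&& 1 = 1 then bitVal row r m + row.getD r 0 else bitVal row r m := by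
  unfold bitVal
  rw [List.range_succ, List.foldl_append]
  simp

theorem bitVal_eq_zero (row : List Int) (r m : Nat)
    (h : ∀ k < r, m.testBit k = false) : bitVal row r m = 0 := by
  induction r with
  | zero => rfl
  | succ r ih =>
      rw [bitVal_succ]
      have hr := h r (by omega)
      rw [if_neg (by rw [bit_iff]; simp [hr])]
      exact ih (fun k hk => h k (by omega))

theorem bitVal_single (row : List Int) (r k : Nat) (hk : k < r) :
    bitVal row r (2 ^ k) = row.getD k 0 := by
  induction r with
  | zero => omega
  | succ r ih =>
      rw [bitVal_succ]
      by_cases h : k = r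
      · subst h
        rw [if_pos (by rw [bit_iff]; exact Nat.testBit_two_pow_self),
          bitVal_eq_zero row k (2 ^ k) (fun i hi => Nat.testBit_two_pow_of_ne (by omega))]
        simp
      · rw [if_neg (by rw [bit_iff]; simp [Nat.testBit_two_pow_of_ne (show k ≠ r from h)]),
          ih (by omega)]

theorem bitVal_split_aux (row : List Int) (k s : Nat) (hs : s.testBit k = true) :
    ∀ r, bitVal row r s = bitVal row r (s - 2 ^ k) + (if k < r then row.getD k 0 else 0) := by
  intro r
  induction r with
  | zero => simp [bitVal]
  | succ r ih =>
      rw [bitVal_succ, bitVal_succ]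
      have hb := testBit_sub_pow k s hs r
      by_cases hkr : r = k
      · subst hkr
        rw [if_pos (by rw [bit_iff]; exact hs)]
        rw [if_neg (by rw [bit_iff, hb]; simp)]
        rw [ih]
        rw [if_neg (by omega), if_pos (by omega)]
        omega
      · have hbb : (s - 2 ^ k).testBit r = s.testBit r := by rw [hb, if_neg hkr]
        have hcond : ((s - 2 ^ k) >>> r &&& 1 = 1) ↔ (s >>> r &&& 1 = 1) := by
          rw [bit_iff, bit_iff, hbb]
        rw [ih]
        by_cases hc : s >>> r &&& 1 = 1
        · rw [if_pos hc, if_pos (hcond.mpr hc)]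
          split_ifs <;> omega
        · rw [if_neg hc, if_neg (fun h => hc (hcond.mp h))]
          split_ifs <;> omega

theorem bitVal_split (row : List Int) (r s k : Nat) (hk : k < r) (hs : s.testBit k = true) :
    bitVal row r s = bitVal row r (s - 2 ^ k) + row.getD k 0 := by
  rw [bitVal_split_aux row k s hs r, if_pos hk]

-- ---- the reference minimum: min over all nonempty submasks s' ≤ s of j ----

def gA (prev : List (Option Int)) (row : List Int) (r j s : Nat) : Option Int :=
  addO (prev.getD (j - s) none) (bitVal row r s)

def subUpTo (j s : Nat) : List Nat :=
  (List.range (s + 1)).filter (fun s' => decide (s' ≠ 0) && (s' &&& j == s'))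

def refA (prev : List (Option Int)) (row : List Int) (r j s : Nat) : Option Int :=
  minsF ((subUpTo j s).map (gA prev row r j))

theorem mem_subUpTo (j s s' : Nat) :
    s' ∈ subUpTo j s ↔ s' ≤ s ∧ s' ≠ 0 ∧ s' &&& j = s' := by
  simp [subUpTo, List.mem_filter, List.mem_range, Nat.lt_succ_iff, and_assoc]

theorem optLt_min (b c : Option Int) : (if optLtB c b then c else b) = pyMinO b c := by
  cases b with
  | none => cases c <;> simp [optLtB, pyMinO]
  | some bv =>
      cases c with
      | none => simp [optLtB, pyMinO]
      | some cv =>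
          simp only [optLtB, pyMinO]
          split_ifs with h
          · rw [min_eq_right (le_of_lt (by exact_mod_cast of_decide_eq_true (by simpa using h)))]
          · rw [min_eq_left (by
              have : ¬ cv < bv := by simpa using h
              omega)]

-- subLoopA from s computes acc `min` the reference minimum over submasks ≤ s
theorem subLoopA_eq_refA (prev : List (Option Int)) (row : List Int) (r j : Nat) :
    ∀ s, s &&& j = s → ∀ acc, subLoopA prev row r j s acc = pyMinO acc (refA prev row r j s) := by
  intro s
  induction s using Nat.strong_induction_on with
  | _ s ih =>
    intro hsub acc
    by_cases hs : s = 0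
    · subst hs
      rw [subLoopA]
      simp only [if_pos rfl]
      have : subUpTo j 0 = [] := rfl
      rw [refA, this]
      simp [minsF, List.foldl, pyMinO_none_right]
    · rw [subLoopA, if_neg hs]
      have ht : (s - 1) &&& j &&& j = (s - 1) &&& j := by rw [Nat.and_assoc, Nat.and_self]
      have htlt : (s - 1) &&& j < s := by
        have := Nat.and_le_left (n := s - 1) (m := j); omega
      rw [ih _ htlt ht]
      rw [pyMinO_assoc]
      congr 1
      -- pyMinO (gA s) (refA (s-1)&&&j) = refA s
      rw [show addO (prev.getD (j - s) none) (bitVal row r s) = gA prev row r j s from rfl]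
      have hcons : pyMinO (gA prev row r j s) (refA prev row r j ((s - 1) &&& j)) =
          minsF (gA prev row r j s :: (subUpTo j ((s - 1) &&& j)).map (gA prev row r j)) := by
        rw [minsF_cons]; rfl
      rw [hcons, refA]
      apply minsF_eq_of_dominate
      · intro x hx
        rcases List.mem_cons.mp hx with rfl | hx'
        · exact ⟨gA prev row r j s, List.mem_map_of_mem
            ((mem_subUpTo j s s).mpr ⟨le_rfl, hs, hsub⟩), oLe_refl _⟩
        · obtain ⟨s', hs', rfl⟩ := List.mem_map.mp hx'
          rw [mem_subUpTo] at hs'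
          exact ⟨gA prev row r j s', List.mem_map_of_mem
            ((mem_subUpTo j s s').mpr ⟨by omega, hs'.2.1, hs'.2.2⟩), oLe_refl _⟩
      · intro y hy
        obtain ⟨s', hs', rfl⟩ := List.mem_map.mp hy
        rw [mem_subUpTo] at hs'
        by_cases hss : s' = s
        · subst hss
          exact ⟨gA prev row r j s', List.mem_cons_self .., oLe_refl _⟩
        · have hlt : s' < s := by omega
          have : s' ≤ (s - 1) &&& j := submask_le_pred_and j s s' hsub hs'.2.2 hlt
          exact ⟨gA prev row r j s', List.mem_cons_of_mem _ (List.mem_map_of_mem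
            ((mem_subUpTo j ((s - 1) &&& j) s').mpr ⟨this, hs'.2.1, hs'.2.2⟩)), oLe_refl _⟩

-- ---- B's t-table computes the same reference minimum ----

theorem buildT_length (prev : List (Option Int)) (row : List Int) (r : Nat) :
    ∀ n, (buildT prev row r n).length = n := by
  intro n
  induction n with
  | zero => rfl
  | succ n ih => simp [buildT, ih]

theorem buildT_getD (prev : List (Option Int)) (row : List Int) (r : Nat) :
    ∀ n mask, mask < n → (buildT prev row r n).getD mask none =
      (if mask = 0 then none else innerB prev (buildT prev row r mask) row r mask) := by
  intro n
  induction n with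
  | zero => omega
  | succ n ih =>
      intro mask hm
      by_cases h : mask < n
      · rw [buildT, List.getD_append _ _ _ _ (by rw [buildT_length]; exact h)]
        exact ih mask h
      · have hmn : mask = n := by omega
        subst hmn
        rw [buildT, List.getD_append_right _ _ _ _ (by rw [buildT_length])]
        simp [buildT_length]

theorem innerB_eq_minsF (prev t : List (Option Int)) (row : List Int) (r mask : Nat) :
    innerB prev t row r mask =
      minsF (((List.range r).filter (fun k => (mask >>> k) &&& 1 == 1)).map (fun k =>
        addO (pyMinO (prev.getD (mask - 2 ^ k) none) (t.getD (mask - 2 ^ k) none))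
          (row.getD k 0))) := by
  unfold innerB minsF
  rw [List.foldl_map, List.foldl_filter]
  congr 1
  funext best k
  simp only [beq_iff_eq]
  by_cases h : (mask >>> k) &&& 1 = 1
  · rw [if_pos h, if_pos h]
    exact optLt_min best _
  · rw [if_neg h, if_neg h]

theorem pyMinO_choice (a b : Option Int) : pyMinO a b = a ∨ pyMinO a b = b := by
  cases a with
  | none => right; rfl
  | some x =>
      cases b with
      | none => left; rfl
      | some y =>
          rcases min_choice x y with h | h
          · left; simp [pyMinO, h]
          · right; simp [pyMinO, h]

-- body of B's t at `mask` equals the reference minimum over all nonempty submasks of mask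
theorem bodyB_eq_refA (prev : List (Option Int)) (row : List Int) (r : Nat) :
    ∀ mask, mask < 2 ^ r →
      (if mask = 0 then none else innerB prev (buildT prev row r mask) row r mask) =
        refA prev row r mask mask := by
  intro mask
  induction mask using Nat.strong_induction_on with
  | _ mask ihm =>
    intro hmr
    by_cases h0 : mask = 0
    · subst h0
      rfl
    rw [if_neg h0, innerB_eq_minsF]
    -- replace each t-read by the reference value (strong induction hypothesis)
    have hread : ∀ k, (mask >>> k) &&& 1 = 1 →
        (buildT prev row r mask).getD (mask - 2 ^ k) none =
          refA prev row r (mask - 2 ^ k) (mask - 2 ^ k) := by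
      intro k hk
      have hkb : mask.testBit k = true := (bit_iff mask k).mp hk
      have hge : 2 ^ k ≤ mask := two_pow_le_of_testBit _ _ hkb
      have hlt : mask - 2 ^ k < mask := by have : 0 < 2 ^ k := Nat.two_pow_pos k; omega
      rw [buildT_getD prev row r mask (mask - 2 ^ k) hlt]
      exact ihm _ hlt (by omega)
    show _ = minsF ((subUpTo mask mask).map (gA prev row r mask))
    apply minsF_eq_of_dominate
    · -- every single-bit transition candidate dominates some submask candidate
      intro x hx
      obtain ⟨k, hk, rfl⟩ := List.mem_map.mp hx
      rw [List.mem_filter, List.mem_range] at hk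
      obtain ⟨hkr, hkbit⟩ := hk
      have hkc : (mask >>> k) &&& 1 = 1 := by simpa using hkbit
      have hkb : mask.testBit k = true := (bit_iff mask k).mp hkc
      have hge : 2 ^ k ≤ mask := two_pow_le_of_testBit _ _ hkb
      rw [hread k hkc]
      set pm := mask - 2 ^ k with hpm
      rcases pyMinO_choice (prev.getD pm none) (refA prev row r pm pm) with hch | hch <;> rw [hch]
      · -- candidate = prev[pm] + row[k] = gA mask {2^k}
        refine ⟨gA prev row r mask (2 ^ k), List.mem_map_of_mem ?_, ?_⟩
        · rw [mem_subUpTo]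
          refine ⟨hge, by positivity, ?_⟩
          rw [submask_iff]
          intro i hi
          have : i = k := by
            by_contra hne
            rw [Nat.testBit_two_pow_of_ne (fun h => hne h.symm)] at hi
            exact Bool.false_ne_true hi
          subst this; exact hkb
        · rw [gA, bitVal_single row r k hkr]
          have : mask - 2 ^ k = pm := rfl
          rw [this]
          exact oLe_refl _
      · -- candidate = refA pm pm + row[k]
        rcases minsF_mem ((subUpTo pm pm).map (gA prev row r pm)) with hn | hm
        · unfold refA
          rw [hn]
          refine ⟨gA prev row r mask mask, List.mem_map_of_mem
            ((mem_subUpTo mask mask mask).mpr ⟨le_rfl, h0, Nat.and_self mask⟩), ?_⟩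
          simp [addO, oLe_none]
        · unfold refA
          obtain ⟨s', hs', heq⟩ := List.mem_map.mp hm
          rw [mem_subUpTo] at hs'
          obtain ⟨hs'le, hs'0, hs'sub⟩ := hs'
          have hpmk : pm.testBit k = false := by
            rw [hpm, testBit_sub_pow k mask hkb k, if_pos rfl]
          have hs'k : s'.testBit k = false := by
            cases hsk : s'.testBit k
            · rfl
            · have := (submask_iff s' pm).mp hs'sub k hsk
              rw [hpmk] at this; exact absurd this (by simp)
          have hadd := testBit_add_pow k s' hs'k
          have hsplit : bitVal row r (s' + 2 ^ k) = bitVal row r s' + row.getD k 0 := by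
            rw [bitVal_split row r (s' + 2 ^ k) k hkr (by rw [hadd k, if_pos rfl])]
            simp
          refine ⟨gA prev row r mask (s' + 2 ^ k), List.mem_map_of_mem ?_, ?_⟩
          · rw [mem_subUpTo]
            have hsub2 : (s' + 2 ^ k) &&& mask = s' + 2 ^ k := by
              rw [submask_iff]
              intro i hi
              rw [hadd i] at hi
              by_cases hik : i = k
              · subst hik; exact hkb
              · rw [if_neg hik] at hi
                have := (submask_iff s' pm).mp hs'sub i hi
                rw [hpm, testBit_sub_pow k mask hkb i, if_neg hik] at this
                exact this
            refine ⟨?_, by positivity, hsub2⟩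
            have := Nat.and_le_right (m := s' + 2 ^ k) (n := mask)
            omega
          · rw [gA, hsplit]
            have harith : mask - (s' + 2 ^ k) = pm - s' := by omega
            rw [harith, ← heq, gA]
            -- addO (addO o a) b = addO o (a + b)
            cases hpo : prev.getD (pm - s') none with
            | none => simp [addO, oLe_none]
            | some v => simp [addO, oLe, le_refl, add_assoc]
    · -- every submask candidate dominates some single-bit transition candidate
      intro y hy
      obtain ⟨S, hS, rfl⟩ := List.mem_map.mp hy
      rw [mem_subUpTo] at hS
      obtain ⟨hSle, hS0, hSsub⟩ := hS
      obtain ⟨k, hk⟩ := exists_testBit S hS0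
      have hkm : mask.testBit k = true := (submask_iff S mask).mp hSsub k hk
      have hkr : k < r := by
        by_contra hge
        rw [Nat.testBit_lt_two_pow (lt_of_lt_of_le hmr (Nat.pow_le_pow_right (by omega) (by omega)))] at hkm
        exact Bool.false_ne_true hkm
      have hkc : (mask >>> k) &&& 1 = 1 := (bit_iff mask k).mpr hkm
      have hgeS : 2 ^ k ≤ S := two_pow_le_of_testBit _ _ hk
      have hgeM : 2 ^ k ≤ mask := two_pow_le_of_testBit _ _ hkm
      set pm := mask - 2 ^ k with hpm
      refine ⟨addO (pyMinO (prev.getD pm none) ((buildT prev row r mask).getD pm none))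
        (row.getD k 0), List.mem_map_of_mem ?_, ?_⟩
      · rw [List.mem_filter, List.mem_range]
        exact ⟨hkr, by simpa using hkc⟩
      · rw [hread k hkc]
        have hsplit : bitVal row r S = bitVal row r (S - 2 ^ k) + row.getD k 0 :=
          bitVal_split row r S k hkr hk
        by_cases hSk : S = 2 ^ k
        · -- S = {k}: compare against the prev[pm] branch
          subst hSk
          rw [gA, hsplit]
          have : (2 ^ k - 2 ^ k) = 0 := by omega
          rw [this, bitVal_eq_zero row r 0 (fun i _ => Nat.zero_testBit i)]
          have harith : mask - 2 ^ k = pm := rfl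
          rw [harith]
          refine oLe_trans _ _ _ (oLe_addO _ _ _ (pyMinO_le_left _ _)) ?_
          simp only [zero_add]
          exact oLe_refl _
        · -- S has another bit: compare against the refA pm pm branch
          set S' := S - 2 ^ k with hS'
          have hS'0 : S' ≠ 0 := by
            intro h
            exact hSk (by omega)
          have hmaskk : pm.testBit k = false := by
            rw [hpm, testBit_sub_pow k mask hkm k, if_pos rfl]
          have hS'sub : S' &&& pm = S' := by
            rw [submask_iff]
            intro i hi
            rw [hS', testBit_sub_pow k S hk i] at hi
            by_cases hik : i = k
            · rw [if_pos hik] at hi; exact absurd hi (by simp)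
            · rw [if_neg hik] at hi
              have := (submask_iff S mask).mp hSsub i hi
              rw [hpm, testBit_sub_pow k mask hkm i, if_neg hik]
              exact this
          have hS'mem : gA prev row r pm S' ∈ (subUpTo pm pm).map (gA prev row r pm) := by
            apply List.mem_map_of_mem
            rw [mem_subUpTo]
            refine ⟨?_, hS'0, hS'sub⟩
            have := Nat.and_le_right (m := S') (n := pm)
            omega
          have hle1 : oLe (refA prev row r pm pm) (gA prev row r pm S') :=
            minsF_le _ _ hS'mem
          have hle2 : oLe (pyMinO (prev.getD pm none) (refA prev row r pm pm))
              (gA prev row r pm S') :=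
            oLe_trans _ _ _ (pyMinO_le_right _ _) hle1
          refine oLe_trans _ _ _ (oLe_addO _ _ (row.getD k 0) hle2) ?_
          have harith : mask - S = pm - S' := by omega
          rw [gA, gA, hsplit, harith]
          cases prev.getD (pm - S') none with
          | none => simp [addO, oLe]
          | some v => simp [addO, oLe]; omega

-- ---- tying the two row transitions together ----

theorem rowStep_eq (r : Nat) (prev : List (Option Int)) (row : List Int) :
    rowStepB r prev row
      = rowStepA r prev row ((PySem.List.min? row (fun y => y)).getD 0) := by
  unfold rowStepA rowStepB
  apply List.map_congr_left
  intro j hj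
  rw [List.mem_range] at hj
  by_cases h0 : j = 0
  · simp [h0]
  · simp only [if_neg h0]
    have hA := subLoopA_eq_refA prev row r j j (Nat.and_self j) none
    have hB : (buildT prev row r (2 ^ r)).getD j none = refA prev row r j j := by
      rw [buildT_getD prev row r (2 ^ r) j hj]
      exact bodyB_eq_refA prev row r j hj
    rw [hA, hB]
    rfl

theorem sumBits_eq_bitVal (row : List Int) (r m : Nat) :
    sumBitsB row r m = bitVal row r m := by
  unfold sumBitsB bitVal
  rw [List.foldl_filter]
  congr 1
  funext s k
  by_cases h : (m >>> k) &&& 1 = 1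
  · rw [if_pos (by simpa using h), if_pos h]
  · rw [if_neg (by simpa using h), if_neg h]

theorem prev0_eq_dp0A (row0 : List Int) (r : Nat) :
    (List.range (2 ^ r)).map (fun mask =>
        if mask = 0 then none else some (sumBitsB row0 r mask)) = dp0A row0 r := by
  unfold dp0A
  apply List.map_congr_left
  intro i _
  rw [sumBits_eq_bitVal]

theorem zip_self_map {α β : Type} (l : List α) (f : α → β) :
    List.zip l (l.map f) = l.map (fun x => (x, f x)) := by
  induction l with
  | nil => rfl
  | cons x xs ih => simpa [List.zip] using ih

theorem getLastD_fold {α : Type} (f : List (Option Int) → α → List (Option Int))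
    (xs : List α) (tab : List (List (Option Int))) (h : tab ≠ []) :
    ((xs.foldl (fun t x => t ++ [f (t.getLastD []) x]) tab).getLastD []) =
      xs.foldl f (tab.getLastD []) := by
  induction xs generalizing tab with
  | nil => rfl
  | cons x xs ih =>
      simp only [List.foldl_cons]
      rw [ih _ (by simp)]
      congr 1
      simp

-- ===== VERDICT (by name: the statement is the Claim_ definition above) =====
theorem connectTwoGroups_tle_spec : Claim_equal_connectTwoGroups_tle := by
  intro cost _ _
  unfold Spec_connectTwoGroups_tle
  simp only [connectTwoGroups_tle, connectTwoGroups_tle_alt]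
  rw [← List.map_drop (f := fun row => (PySem.List.min? row (fun y => y)).getD 0)
    (l := cost) (i := 1)]
  rw [zip_self_map, List.foldl_map]
  rw [getLastD_fold
    (fun p x => rowStepA (cost.headD []).length p x ((PySem.List.min? x (fun y => y)).getD 0))
    (cost.drop 1) _ (by simp)]
  simp only [rowStep_eq, prev0_eq_dp0A, List.getLastD_cons, List.getLastD_nil]
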